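-- pv_equiv track=rewrite | github.com/inpalpra/TeXicode | src/renderer.py | _split_row_into_cells
-- ===== SOURCE A (Python) =====
-- def _split_row_into_cells(sketch, amps):
--     """Split a row sketch into cells using amp column positions."""
--     if not amps:
--         return [sketch]
--     boundaries = [0] + amps + [len(sketch[0])]
--     cells = []
--     for i in range(len(boundaries) - 1):
--         start = boundaries[i]
--         end = boundaries[i + 1]
--         cell = [row[start:end] for row in sketch]
--         cells.append(cell)
--     return cells
-- ===== SOURCE B (Python) =====
-- def _split_row_into_cells(sketch, amps):
--     """Split a row sketch into cells using amp column positions."""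
--     if not amps:
--         return [sketch]
--     boundaries = [0] + amps + [len(sketch[0])]
--     pairs = list(zip(boundaries, boundaries[1:]))
--     row_segments = [[row[s:e] for (s, e) in pairs] for row in sketch]
--     return [[segs[j] for segs in row_segments] for j in range(len(pairs))]
-- ===== Notes on version B (the rewrite author's own statement) =====
-- stated objective: alternative
-- what changed: B segments each row once (row-major, over zipped adjacent boundary pairs) and then transposes by index into the column-major cell list, instead of A's column-major outer loop that re-slices every row per boundary pair.
import Mathlib
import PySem

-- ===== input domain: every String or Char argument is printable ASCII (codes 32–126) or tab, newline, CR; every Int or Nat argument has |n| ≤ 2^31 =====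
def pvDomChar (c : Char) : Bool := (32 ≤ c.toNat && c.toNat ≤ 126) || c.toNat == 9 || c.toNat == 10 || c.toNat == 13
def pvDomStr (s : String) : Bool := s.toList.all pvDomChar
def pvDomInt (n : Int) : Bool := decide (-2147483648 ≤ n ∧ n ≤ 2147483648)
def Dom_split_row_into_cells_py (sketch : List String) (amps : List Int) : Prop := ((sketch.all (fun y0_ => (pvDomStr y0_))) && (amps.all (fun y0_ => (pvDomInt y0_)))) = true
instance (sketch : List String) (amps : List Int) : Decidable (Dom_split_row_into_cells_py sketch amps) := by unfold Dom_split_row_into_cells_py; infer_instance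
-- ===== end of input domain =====

-- B segments each row once over zipped adjacent boundary pairs and transposes by index,
-- instead of A's column-major loop that re-slices every row per boundary pair; same cost.

-- ===== PORT A =====
-- sketch[0] raises IndexError on empty sketch (with non-empty amps): excluded by Pre_;
-- headI's default "" is only reached outside Pre_.
def split_row_into_cells_py (sketch : List String) (amps : List Int) : List (List String) :=
  if amps.isEmpty then [sketch]
  else
    let boundaries : List Int := 0 :: (amps ++ [PySem.Str.len sketch.headI])
    (PySem.List.pyRange 0 ((boundaries.length : Int) - 1) 1).foldl
      (fun cells i =>
        let s := PySem.List.pyGetD boundaries i 0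
        let e := PySem.List.pyGetD boundaries (i + 1) 0
        cells ++ [sketch.map (fun row => PySem.Str.slice row (some s) (some e))])
      []

-- ===== PORT B =====
def split_row_into_cells_py_alt (sketch : List String) (amps : List Int) : List (List String) :=
  if amps.isEmpty then [sketch]
  else
    let boundaries : List Int := 0 :: (amps ++ [PySem.Str.len sketch.headI])
    let pairs := boundaries.zip boundaries.tail
    let rowSegments := sketch.map (fun row =>
      pairs.map (fun p => PySem.Str.slice row (some p.1) (some p.2)))
    (PySem.List.pyRange 0 ((pairs.length : Int)) 1).map
      (fun j => rowSegments.map (fun segs => PySem.List.pyGetD segs j ""))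

-- ===== PRECONDITION & SPEC =====
-- Pre_ excludes the inputs (empty sketch with non-empty amps) on which the Python A raises IndexError.
def Pre_split_row_into_cells_py (sketch : List String) (amps : List Int) : Prop :=
  amps = [] ∨ sketch ≠ []
instance (sketch : List String) (amps : List Int) : Decidable (Pre_split_row_into_cells_py sketch amps) := by unfold Pre_split_row_into_cells_py; infer_instance

def pvWitness_split_row_into_cells_py : List String × List Int := (["ab", "cd"], [1])

def Spec_split_row_into_cells_py (sketch : List String) (amps : List Int) (out : List (List String)) : Prop := out = split_row_into_cells_py_alt sketch amps
instance (sketch : List String) (amps : List Int) (out : List (List String)) : Decidable (Spec_split_row_into_cells_py sketch amps out) := by unfold Spec_split_row_into_cells_py; infer_instance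

-- ===== CLAIM (what is proved, stated in full; the proofs are below) =====
def Claim_equal_split_row_into_cells_py : Prop := ∀ (sketch : List String) (amps : List Int), Dom_split_row_into_cells_py sketch amps → Pre_split_row_into_cells_py sketch amps → Spec_split_row_into_cells_py sketch amps (split_row_into_cells_py sketch amps)

-- ===== LEMMAS AND PROOFS =====

theorem split_row_into_cells_py_eq_alt (sketch : List String) (amps : List Int) :
    split_row_into_cells_py sketch amps = split_row_into_cells_py_alt sketch amps := by
  unfold split_row_into_cells_py split_row_into_cells_py_alt
  by_cases h : amps.isEmpty
  · simp [h]
  · simp only [h, Bool.false_eq_true, if_false]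
    set b : List Int := 0 :: (amps ++ [PySem.Str.len sketch.headI]) with hb
    have hlen : b.length = amps.length + 2 := by simp [hb]
    have hpairs : (b.zip b.tail).length = amps.length + 1 := by
      simp [List.length_zip, hlen]
    rw [PySem.List.foldl_append_singleton_eq_map]
    rw [hpairs, hlen]
    have hrange : ((amps.length + 2 : Nat) : Int) - 1 = ((amps.length + 1 : Nat) : Int) := by
      push_cast; ring
    rw [hrange]
    rw [PySem.List.pyRange_one 0 ((amps.length + 1 : Nat) : Int)]
    simp only [List.nil_append, zero_add, Int.sub_zero, Int.toNat_natCast, List.map_map]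
    apply List.map_congr_left
    intro k hk
    simp only [List.mem_range] at hk
    simp only [Function.comp_apply]
    have hk2 : k + 1 < b.length := by omega
    have hkp : k < (b.zip b.tail).length := by omega
    have h1 : PySem.List.pyGetD b (k : Int) 0 = b[k]'(by omega) :=
      PySem.List.pyGetD_ofNat b k 0 (by omega)
    have h2 : PySem.List.pyGetD b ((k : Int) + 1) 0 = b[k + 1]'hk2 :=
      PySem.List.pyGetD_ofNat b (k + 1) 0 hk2
    rw [h1, h2]
    apply List.map_congr_left
    intro row _
    have hget : PySem.List.pyGetD
        ((b.zip b.tail).map (fun p => PySem.Str.slice row (some p.1) (some p.2))) (k : Int) ""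
        = PySem.Str.slice row (some (((b.zip b.tail)[k]'hkp).1))
            (some (((b.zip b.tail)[k]'hkp).2)) := by
      have := PySem.List.pyGetD_ofNat
        ((b.zip b.tail).map (fun p => PySem.Str.slice row (some p.1) (some p.2))) k ""
        (by simpa using hkp)
      simpa using this
    simp only [Function.comp_apply]
    rw [hget]
    congr 1
    · congr 1
      simp [List.getElem_zip]
    · congr 1
      simp [List.getElem_zip, List.getElem_tail]

-- ===== VERDICT (by name: the statement is the Claim_ definition above) =====
theorem split_row_into_cells_py_spec : Claim_equal_split_row_into_cells_py := by
  intro sketch amps _ _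
  unfold Spec_split_row_into_cells_py
  exact split_row_into_cells_py_eq_alt sketch amps
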